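-- pv_equiv track=rewrite | github.com/tawanerguo-cn/algorithm | cs101_10.19.2.py | aaa_to_rc
-- ===== SOURCE A (Python) =====
-- letter  = ['A','B','C','D','E','F','G','H','I','J','K','L','M','N','O','P','Q','R','S','T','U','V','W','X','Y','Z']
--
-- number = ['1','2','3','4','5','6','7','8','9','0']
--
-- def aaa_to_rc(m):
--     col = []
--     row = []
--     for i in m:
--         if i in letter:
--             col.append(letter.index(i) + 1)
--         elif i in number:
--             row.append(i)
--     row1 = int(''.join(i for i in row))
--     col1 = 0
--     l1 = len(col)
--     for i in range(l1):
--         col1 += 26 ** (l1 - 1 - i) * col[i]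
--     ans = ['R', str(row1), 'C', str(col1)]
--     ans1 = ''.join(i for i in ans)
--     return ans1
-- ===== SOURCE B (Python) =====
-- def aaa_to_rc(m):
--     col = 0
--     digits = []
--     for c in m:
--         if 'A' <= c <= 'Z':
--             col = col * 26 + (ord(c) - ord('A') + 1)
--         elif '0' <= c <= '9':
--             digits.append(c)
--     return 'R' + str(int(''.join(digits))) + 'C' + str(col)
-- ===== Notes on version B (the rewrite author's own statement) =====
-- stated objective: simpler
-- what changed: Single pass with a Horner integer accumulator (col = col*26 + ord(c)-ord('A')+1) and range-comparison char tests replaces A's two-pass scheme of collecting an index list via letter.index lookups and then summing explicit 26**(l-1-i) powers.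
-- outside the precondition, e.g. on aaa_to_rc('A'): A raises ValueError, B raises ValueError; on aaa_to_rc(''): A raises ValueError, B raises ValueError
import Mathlib
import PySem

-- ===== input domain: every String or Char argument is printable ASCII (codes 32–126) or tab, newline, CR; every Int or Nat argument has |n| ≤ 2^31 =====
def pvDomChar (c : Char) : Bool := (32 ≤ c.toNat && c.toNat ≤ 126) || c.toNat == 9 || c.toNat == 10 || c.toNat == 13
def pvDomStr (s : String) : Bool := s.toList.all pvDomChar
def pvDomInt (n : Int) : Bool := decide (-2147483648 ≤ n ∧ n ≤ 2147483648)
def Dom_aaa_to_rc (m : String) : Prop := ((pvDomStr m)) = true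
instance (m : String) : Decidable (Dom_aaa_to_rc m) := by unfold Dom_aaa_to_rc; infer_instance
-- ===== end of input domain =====

-- B replaces A's two-pass parse (index list + explicit 26**(l-1-i) power sum) by one
-- single-pass Horner fold; objective: simpler.

-- ===== PORT A =====
def pyLetter : List Char :=
  ['A','B','C','D','E','F','G','H','I','J','K','L','M','N','O','P','Q','R','S','T','U','V','W','X','Y','Z']

def pyNumber : List Char := ['1','2','3','4','5','6','7','8','9','0']

def aaa_to_rc (m : String) : String :=
  -- for i in m: if i in letter: col.append(letter.index(i)+1) elif i in number: row.append(i)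
  let st := m.toList.foldl (fun (st : List Int × List Char) i =>
    if i ∈ pyLetter then
      (st.1 ++ [((PySem.List.index? pyLetter i).getD 0 : Int) + 1], st.2)
    else if i ∈ pyNumber then (st.1, st.2 ++ [i])
    else st) ([], [])
  let col := st.1
  let row := st.2
  -- row1 = int(''.join(row)); raises ValueError when row is empty (excluded by Pre_)
  let row1 := (PySem.Int.ofStr? (String.mk row)).getD 0
  let l1 : Int := (col.length : Int)
  -- for i in range(l1): col1 += 26 ** (l1 - 1 - i) * col[i]
  let col1 := (PySem.List.pyRange 0 l1 1).foldl
    (fun acc i => acc + 26 ^ ((l1 - 1 - i).toNat) * PySem.List.pyGetD col i 0) 0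
  "R" ++ PySem.Int.toStr row1 ++ "C" ++ PySem.Int.toStr col1

-- ===== PORT B =====
def aaa_to_rc_alt (m : String) : String :=
  -- one pass: Horner accumulator for the column, digit chars collected for the row
  -- (char range comparisons 'A' <= c <= 'Z' ported on code points, exact for Python's str order)
  let st := m.toList.foldl (fun (st : Int × List Char) c =>
    if 65 ≤ c.toNat ∧ c.toNat ≤ 90 then          -- 'A' <= c <= 'Z'
      (st.1 * 26 + ((c.toNat : Int) - 65 + 1), st.2)
    else if 48 ≤ c.toNat ∧ c.toNat ≤ 57 then     -- '0' <= c <= '9'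
      (st.1, st.2 ++ [c])
    else st) (0, [])
  -- int(''.join(digits)); raises ValueError when no digit occurred (excluded by Pre_)
  let row := (PySem.Int.ofStr? (String.mk st.2)).getD 0
  "R" ++ PySem.Int.toStr row ++ "C" ++ PySem.Int.toStr st.1

-- ===== PRECONDITION & SPEC =====
-- Pre_ excludes strings containing no decimal digit: there int('') raises ValueError in A (and in B).
def Pre_aaa_to_rc (m : String) : Prop :=
  (m.toList.any (fun c => 48 ≤ c.toNat && c.toNat ≤ 57)) = true
instance (m : String) : Decidable (Pre_aaa_to_rc m) := by unfold Pre_aaa_to_rc; infer_instance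

def pvWitness_aaa_to_rc : String := "AB12"

def Spec_aaa_to_rc (m : String) (out : String) : Prop := out = aaa_to_rc_alt m
instance (m : String) (out : String) : Decidable (Spec_aaa_to_rc m out) := by unfold Spec_aaa_to_rc; infer_instance

-- ===== CLAIM (what is proved, stated in full; the proofs are below) =====
def Claim_equal_aaa_to_rc : Prop := ∀ (m : String), Dom_aaa_to_rc m → Pre_aaa_to_rc m → Spec_aaa_to_rc m (aaa_to_rc m)

-- ===== LEMMAS AND PROOFS =====

def pvHorner (xs : List Int) : Int := xs.foldl (fun a v => a * 26 + v) 0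

lemma mem_pyLetter (c : Char) : c ∈ pyLetter ↔ (65 ≤ c.toNat ∧ c.toNat ≤ 90) := by
  constructor
  · intro h; fin_cases h <;> decide
  · intro h
    have h26 : c.toNat = 65 ∨ c.toNat = 66 ∨ c.toNat = 67 ∨ c.toNat = 68 ∨ c.toNat = 69 ∨
        c.toNat = 70 ∨ c.toNat = 71 ∨ c.toNat = 72 ∨ c.toNat = 73 ∨ c.toNat = 74 ∨
        c.toNat = 75 ∨ c.toNat = 76 ∨ c.toNat = 77 ∨ c.toNat = 78 ∨ c.toNat = 79 ∨
        c.toNat = 80 ∨ c.toNat = 81 ∨ c.toNat = 82 ∨ c.toNat = 83 ∨ c.toNat = 84 ∨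
        c.toNat = 85 ∨ c.toNat = 86 ∨ c.toNat = 87 ∨ c.toNat = 88 ∨ c.toNat = 89 ∨
        c.toNat = 90 := by omega
    have hc : ∀ n, c.toNat = n → c = Char.ofNat n := by
      intro n hn; subst hn; exact (Char.ofNat_toNat c).symm
    rcases h26 with h|h|h|h|h|h|h|h|h|h|h|h|h|h|h|h|h|h|h|h|h|h|h|h|h|h <;>
      rw [hc _ h] <;> decide

lemma mem_pyNumber (c : Char) : c ∈ pyNumber ↔ (48 ≤ c.toNat ∧ c.toNat ≤ 57) := by
  constructor
  · intro h; fin_cases h <;> decide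
  · intro h
    have h10 : c.toNat = 48 ∨ c.toNat = 49 ∨ c.toNat = 50 ∨ c.toNat = 51 ∨ c.toNat = 52 ∨
        c.toNat = 53 ∨ c.toNat = 54 ∨ c.toNat = 55 ∨ c.toNat = 56 ∨ c.toNat = 57 := by omega
    have hc : ∀ n, c.toNat = n → c = Char.ofNat n := by
      intro n hn; subst hn; exact (Char.ofNat_toNat c).symm
    rcases h10 with h|h|h|h|h|h|h|h|h|h <;> rw [hc _ h] <;> decide

lemma letter_val (c : Char) (h : c ∈ pyLetter) :
    ((PySem.List.index? pyLetter c).getD 0 : Int) + 1 = (c.toNat : Int) - 65 + 1 := by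
  fin_cases h <;> decide

lemma horner_append (l : List Int) (v : Int) :
    pvHorner (l ++ [v]) = pvHorner l * 26 + v := by
  simp [pvHorner, List.foldl_append]

-- A's power sum over range(len col) equals the Horner value
lemma powsum_eq_horner (col : List Int) :
    (PySem.List.pyRange 0 (col.length : Int) 1).foldl
      (fun acc i => acc + 26 ^ (((col.length : Int) - 1 - i).toNat) * PySem.List.pyGetD col i 0) 0
      = pvHorner col := by
  induction col using List.reverseRecOn with
  | nil => simp [pvHorner]
  | append_singleton cs v ih =>
    have hlen : (((cs ++ [v]).length : Nat) : Int) = (cs.length : Int) + 1 := by simp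
    rw [hlen, PySem.List.pyRange_one_succ_right (by positivity),
        PySem.List.foldl_add, List.map_append, List.sum_append]
    rw [PySem.List.foldl_add] at ih
    have hlast : PySem.List.pyGetD (cs ++ [v]) (cs.length : Int) 0 = v := by
      rw [PySem.List.pyGetD_natCast]
      simp [List.getD]
    have hpre : (PySem.List.pyRange 0 (cs.length : Int) 1).map
        (fun i => 26 ^ (((cs.length : Int) + 1 - 1 - i).toNat) * PySem.List.pyGetD (cs ++ [v]) i 0)
        = (PySem.List.pyRange 0 (cs.length : Int) 1).map
        (fun i => 26 * (26 ^ (((cs.length : Int) - 1 - i).toNat) * PySem.List.pyGetD cs i 0)) := by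
      apply List.map_congr_left
      intro i hi
      rw [PySem.List.mem_pyRange_one] at hi
      have hget : PySem.List.pyGetD (cs ++ [v]) i 0 = PySem.List.pyGetD cs i 0 := by
        obtain ⟨k, rfl⟩ : ∃ k : Nat, i = (k : Int) := ⟨i.toNat, by omega⟩
        have hk : k < cs.length := by exact_mod_cast hi.2
        rw [PySem.List.pyGetD_natCast, PySem.List.pyGetD_natCast,
            List.getD_append _ _ _ _ hk]
      have hpow : (((cs.length : Int) + 1 - 1 - i).toNat) = (((cs.length : Int) - 1 - i).toNat) + 1 := by
        omega
      rw [hget, hpow, pow_succ]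
      ring
    rw [hpre, List.sum_map_mul_left, horner_append]
    have hexp : (((cs.length : Int) + 1 - 1 - (cs.length : Int)).toNat) = 0 := by omega
    simp only [List.map_cons, List.map_nil, List.sum_cons, List.sum_nil, hexp, pow_zero,
      hlast, one_mul]
    linarith [ih]

-- the one-pass fold of B tracks (Horner of A's col list, A's row list)
lemma fold_rel (cs : List Char) (l : List Int) (r : List Char) :
    cs.foldl (fun (st : Int × List Char) c =>
      if 65 ≤ c.toNat ∧ c.toNat ≤ 90 then
        (st.1 * 26 + ((c.toNat : Int) - 65 + 1), st.2)
      else if 48 ≤ c.toNat ∧ c.toNat ≤ 57 then (st.1, st.2 ++ [c])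
      else st) (pvHorner l, r)
    = (pvHorner (cs.foldl (fun (st : List Int × List Char) i =>
        if i ∈ pyLetter then
          (st.1 ++ [((PySem.List.index? pyLetter i).getD 0 : Int) + 1], st.2)
        else if i ∈ pyNumber then (st.1, st.2 ++ [i])
        else st) (l, r)).1,
       (cs.foldl (fun (st : List Int × List Char) i =>
        if i ∈ pyLetter then
          (st.1 ++ [((PySem.List.index? pyLetter i).getD 0 : Int) + 1], st.2)
        else if i ∈ pyNumber then (st.1, st.2 ++ [i])
        else st) (l, r)).2) := by
  induction cs generalizing l r with
  | nil => simp
  | cons c cs ih =>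
    simp only [List.foldl_cons]
    by_cases hL : c ∈ pyLetter
    · rw [if_pos hL, if_pos ((mem_pyLetter c).mp hL)]
      have hv : pvHorner l * 26 + ((c.toNat : Int) - 65 + 1)
          = pvHorner (l ++ [((PySem.List.index? pyLetter c).getD 0 : Int) + 1]) := by
        rw [horner_append, letter_val c hL]
      simp only [hv]
      exact ih (l ++ [((PySem.List.index? pyLetter c).getD 0 : Int) + 1]) r
    · rw [if_neg hL, if_neg (fun hcon => hL ((mem_pyLetter c).mpr hcon))]
      by_cases hN : c ∈ pyNumber
      · rw [if_pos hN, if_pos ((mem_pyNumber c).mp hN)]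
        exact ih l (r ++ [c])
      · rw [if_neg hN, if_neg (fun hcon => hN ((mem_pyNumber c).mpr hcon))]
        exact ih l r

-- ===== VERDICT (by name: the statement is the Claim_ definition above) =====
theorem aaa_to_rc_spec : Claim_equal_aaa_to_rc := by
  intro m _ _
  unfold Spec_aaa_to_rc aaa_to_rc aaa_to_rc_alt
  have h := fold_rel m.toList [] []
  simp only [show pvHorner [] = 0 from rfl] at h
  simp only [h, powsum_eq_horner]
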